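-- pv_equiv track=rewrite | github.com/ChaoticEvil457/Work | ACSL2/JustinHuangACSLC3.py | diagramRules
-- ===== SOURCE A (Python) =====
-- def diagramRules(inputs,z):
--     x1,x2,x3,x4,y1,y2,y3,y4=True,True,True,True,True,True,True,True
--     negate=False
--     for x in z:
--         if(x=='~'):
--             negate=True
--         elif(negate==True):
--             if(x=='A'):
--                 y1=False
--                 y2=False
--             elif(x=='B'):
--                 x1=False
--                 x2=False
--             elif(x=='C'):
--                 y2=False
--                 y3=False
--             elif(x=='D'):
--                 x2=False
--                 x3=False
--             negate=False
--         elif(negate==False):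
--             if(x=='A'):
--                 y3=False
--                 y4=False
--             elif(x=='B'):
--                 x3=False
--                 x4=False
--             elif(x=='C'):
--                 y1=False
--                 y4=False
--             elif(x=='D'):
--                 x1=False
--                 x4=False
--     return(x1,x2,x3,x4,y1,y2,y3,y4)
-- ===== SOURCE B (Python) =====
-- def diagramRules(inputs, z):
--     tokens = []
--     negate = False
--     for c in z:
--         if c == '~':
--             negate = True
--         else:
--             tokens.append((negate, c))
--             negate = False
--     S = set(tokens)
--     x1 = not ((True, 'B') in S or (False, 'D') in S)
--     x2 = not ((True, 'B') in S or (True, 'D') in S)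
--     x3 = not ((True, 'D') in S or (False, 'B') in S)
--     x4 = not ((False, 'B') in S or (False, 'D') in S)
--     y1 = not ((True, 'A') in S or (False, 'C') in S)
--     y2 = not ((True, 'A') in S or (True, 'C') in S)
--     y3 = not ((True, 'C') in S or (False, 'A') in S)
--     y4 = not ((False, 'A') in S or (False, 'C') in S)
--     return (x1, x2, x3, x4, y1, y2, y3, y4)
-- ===== Notes on version B (the rewrite author's own statement) =====
-- stated objective: alternative
-- what changed: A drives eight boolean flags through an ordered state-machine of per-character writes; B makes one pass collecting (negate, char) tokens into a set and then computes each of the eight flags in closed form by set membership.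
import Mathlib
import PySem

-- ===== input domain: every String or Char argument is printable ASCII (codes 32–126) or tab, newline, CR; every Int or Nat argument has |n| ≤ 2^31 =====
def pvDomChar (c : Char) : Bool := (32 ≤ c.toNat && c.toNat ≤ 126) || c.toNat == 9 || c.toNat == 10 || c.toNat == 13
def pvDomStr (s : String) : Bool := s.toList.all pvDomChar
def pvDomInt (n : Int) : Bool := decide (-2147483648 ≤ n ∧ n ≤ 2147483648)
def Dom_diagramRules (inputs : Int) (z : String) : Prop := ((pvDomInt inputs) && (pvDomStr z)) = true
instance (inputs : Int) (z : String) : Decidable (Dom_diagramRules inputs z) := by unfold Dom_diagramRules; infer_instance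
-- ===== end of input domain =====

-- B replaces A's ordered state-machine writes by one pass collecting (negate, char) tokens
-- into a set, then computes each of the eight flags in closed form by set membership (objective: alternative).

-- ===== PORT A =====
-- one iteration of A's for-loop: state = (the eight flags, negate)
def pyAStep (st : (Bool × Bool × Bool × Bool × Bool × Bool × Bool × Bool) × Bool) (x : Char) :
    (Bool × Bool × Bool × Bool × Bool × Bool × Bool × Bool) × Bool :=
  match st with
  | ((x1, x2, x3, x4, y1, y2, y3, y4), negate) =>
    if x = '~' then ((x1, x2, x3, x4, y1, y2, y3, y4), true)
    else if negate = true then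
      ((if x = 'A' then (x1, x2, x3, x4, false, false, y3, y4)
        else if x = 'B' then (false, false, x3, x4, y1, y2, y3, y4)
        else if x = 'C' then (x1, x2, x3, x4, y1, false, false, y4)
        else if x = 'D' then (x1, false, false, x4, y1, y2, y3, y4)
        else (x1, x2, x3, x4, y1, y2, y3, y4)), false)
    else
      ((if x = 'A' then (x1, x2, x3, x4, y1, y2, false, false)
        else if x = 'B' then (x1, x2, false, false, y1, y2, y3, y4)
        else if x = 'C' then (x1, x2, x3, x4, false, y2, y3, false)
        else if x = 'D' then (false, x2, x3, false, y1, y2, y3, y4)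
        else (x1, x2, x3, x4, y1, y2, y3, y4)), negate)

def diagramRules (inputs : Int) (z : String) : Bool × Bool × Bool × Bool × Bool × Bool × Bool × Bool :=
  (z.toList.foldl pyAStep ((true, true, true, true, true, true, true, true), false)).1

-- ===== PORT B =====
-- one iteration of B's token-collecting loop: state = (tokens so far, negate)
def tokStep (st : List (Bool × Char) × Bool) (c : Char) : List (Bool × Char) × Bool :=
  if c = '~' then (st.1, true) else (st.1 ++ [(st.2, c)], false)

def diagramRules_alt (inputs : Int) (z : String) : Bool × Bool × Bool × Bool × Bool × Bool × Bool × Bool :=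
  let tokens := (z.toList.foldl tokStep ([], false)).1
  let S : PySem.Set (Bool × Char) := PySem.Set.ofList tokens
  ( !(PySem.Set.contains S (true, 'B') || PySem.Set.contains S (false, 'D')),
    !(PySem.Set.contains S (true, 'B') || PySem.Set.contains S (true, 'D')),
    !(PySem.Set.contains S (true, 'D') || PySem.Set.contains S (false, 'B')),
    !(PySem.Set.contains S (false, 'B') || PySem.Set.contains S (false, 'D')),
    !(PySem.Set.contains S (true, 'A') || PySem.Set.contains S (false, 'C')),
    !(PySem.Set.contains S (true, 'A') || PySem.Set.contains S (true, 'C')),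
    !(PySem.Set.contains S (true, 'C') || PySem.Set.contains S (false, 'A')),
    !(PySem.Set.contains S (false, 'A') || PySem.Set.contains S (false, 'C')) )

-- ===== PRECONDITION & SPEC =====
-- explicit DecidableEq for the 8-tuple (nested instance search is depth-limited in this toolchain)
def pvDecEqB8 : DecidableEq (Bool × Bool × Bool × Bool × Bool × Bool × Bool × Bool) :=
  @instDecidableEqProd _ _ instDecidableEqBool (@instDecidableEqProd _ _ instDecidableEqBool
    (@instDecidableEqProd _ _ instDecidableEqBool (@instDecidableEqProd _ _ instDecidableEqBool
      (@instDecidableEqProd _ _ instDecidableEqBool (@instDecidableEqProd _ _ instDecidableEqBool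
        (@instDecidableEqProd _ _ instDecidableEqBool instDecidableEqBool))))))

def Spec_diagramRules (inputs : Int) (z : String) (out : Bool × Bool × Bool × Bool × Bool × Bool × Bool × Bool) : Prop := out = diagramRules_alt inputs z
instance (inputs : Int) (z : String) (out : Bool × Bool × Bool × Bool × Bool × Bool × Bool × Bool) : Decidable (Spec_diagramRules inputs z out) := by unfold Spec_diagramRules; exact pvDecEqB8 _ _

-- ===== CLAIM (what is proved, stated in full; the proofs are below) =====
def Claim_equal_diagramRules : Prop := ∀ (inputs : Int) (z : String), Dom_diagramRules inputs z → Spec_diagramRules inputs z (diagramRules inputs z)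

-- ===== LEMMAS AND PROOFS =====

-- the token list B's loop collects, as a structural recursion (proof-side characterisation)
def tok : List Char → Bool → List (Bool × Char)
  | [], _ => []
  | c :: cs, neg => if c = '~' then tok cs true else (neg, c) :: tok cs false

lemma tokStep_foldl (cs : List Char) (acc : List (Bool × Char)) (neg : Bool) :
    (cs.foldl tokStep (acc, neg)).1 = acc ++ tok cs neg := by
  induction cs generalizing acc neg with
  | nil => simp [tok]
  | cons c cs ih =>
    by_cases hc : c = '~' <;> simp [tok, hc, tokStep, List.foldl_cons, ih]

lemma loopA_eq (cs : List Char) (x1 x2 x3 x4 y1 y2 y3 y4 neg : Bool) :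
    (cs.foldl pyAStep ((x1, x2, x3, x4, y1, y2, y3, y4), neg)).1 =
    ( x1 && !(decide ((true, 'B') ∈ tok cs neg) || decide ((false, 'D') ∈ tok cs neg)),
      x2 && !(decide ((true, 'B') ∈ tok cs neg) || decide ((true, 'D') ∈ tok cs neg)),
      x3 && !(decide ((true, 'D') ∈ tok cs neg) || decide ((false, 'B') ∈ tok cs neg)),
      x4 && !(decide ((false, 'B') ∈ tok cs neg) || decide ((false, 'D') ∈ tok cs neg)),
      y1 && !(decide ((true, 'A') ∈ tok cs neg) || decide ((false, 'C') ∈ tok cs neg)),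
      y2 && !(decide ((true, 'A') ∈ tok cs neg) || decide ((true, 'C') ∈ tok cs neg)),
      y3 && !(decide ((true, 'C') ∈ tok cs neg) || decide ((false, 'A') ∈ tok cs neg)),
      y4 && !(decide ((false, 'A') ∈ tok cs neg) || decide ((false, 'C') ∈ tok cs neg)) ) := by
  induction cs generalizing x1 x2 x3 x4 y1 y2 y3 y4 neg with
  | nil => simp [tok]
  | cons c cs ih =>
    by_cases hc : c = '~'
    · simp [tok, hc, pyAStep, List.foldl_cons, ih]
    · cases neg <;>
      · by_cases hA : c = 'A'
        · simp [tok, hc, hA, pyAStep, List.foldl_cons, ih, List.mem_cons, Prod.ext_iff]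
        · by_cases hB : c = 'B'
          · simp [tok, hc, hB, pyAStep, List.foldl_cons, ih, List.mem_cons, Prod.ext_iff]
          · by_cases hC : c = 'C'
            · simp [tok, hc, hC, pyAStep, List.foldl_cons, ih, List.mem_cons, Prod.ext_iff]
            · by_cases hD : c = 'D'
              · simp [tok, hc, hD, pyAStep, List.foldl_cons, ih, List.mem_cons, Prod.ext_iff]
              · simp [tok, hc, hA, hB, hC, hD, pyAStep, List.foldl_cons, ih, List.mem_cons,
                  Prod.ext_iff, Ne.symm]

-- ===== VERDICT (by name: the statement is the Claim_ definition above) =====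
theorem diagramRules_spec : Claim_equal_diagramRules := by
  intro inputs z _
  show diagramRules inputs z = diagramRules_alt inputs z
  simp [diagramRules, diagramRules_alt, loopA_eq, tokStep_foldl,
    PySem.Set.contains_eq_listContains, PySem.Set.mem_ofList]
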